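-- pv_equiv track=rewrite | github.com/Abhisekh-Coder/MODE | src/parsers/clinical_history.py | parse_clinical_history_text
-- ===== SOURCE A (Python) =====
-- def parse_clinical_history_text(text: str) -> dict:
--     """Parse clinical history text into structured sections."""
--     sections = {}
--     current = 'General'
--     for line in text.split('\n'):
--         line = line.strip()
--         if not line:
--             continue
--         if line.isupper() or line.endswith(':'):
--             current = line.rstrip(':').title()
--             sections[current] = []
--         else:
--             sections.setdefault(current, []).append(line)
--     return {k: '\n'.join(v) for k, v in sections.items()}
-- ===== SOURCE B (Python) =====
-- def parse_clinical_history_text(text: str) -> dict: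
--     """Parse clinical history text into structured sections."""
--     def is_header(l):
--         return l.isupper() or l.endswith(':')
--     lines = [s for s in (l.strip() for l in text.split('\n')) if s]
--     # leading span of content before the first header
--     i = 0
--     while i < len(lines) and not is_header(lines[i]):
--         i += 1
--     sections = {}
--     if i:
--         sections['General'] = '\n'.join(lines[:i])
--     # span scan: each header owns the slice of content up to the next header
--     j = i
--     while j < len(lines):
--         k = j + 1
--         while k < len(lines) and not is_header(lines[k]):
--             k += 1
--         sections[lines[j].rstrip(':').title()] = '\n'.join(lines[j + 1:k])
--         j = k
--     return sections
-- ===== Notes on version B (the rewrite author's own statement) =====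
-- stated objective: alternative
-- what changed: A is a one-pass state machine threading a dict and a current-section key through every raw line with setdefault/append; B first strips and filters the lines, then scans header-to-header SPANS with index pointers, assigning each header the joined slice of content up to the next header (leading slice under 'General'), so no current-key state or incremental appending exists.
import Mathlib
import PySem

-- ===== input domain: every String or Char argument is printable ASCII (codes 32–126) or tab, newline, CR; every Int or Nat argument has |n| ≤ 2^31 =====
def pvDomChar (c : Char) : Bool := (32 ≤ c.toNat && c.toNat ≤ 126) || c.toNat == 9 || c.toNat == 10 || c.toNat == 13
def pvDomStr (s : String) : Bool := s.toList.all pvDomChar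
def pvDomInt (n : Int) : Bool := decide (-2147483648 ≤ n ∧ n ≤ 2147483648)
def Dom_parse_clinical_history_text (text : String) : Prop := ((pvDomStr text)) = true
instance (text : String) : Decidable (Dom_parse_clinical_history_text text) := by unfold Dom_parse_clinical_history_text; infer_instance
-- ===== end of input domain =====

-- B replaces A's one-pass dict-plus-current-key state machine by a span scan: each header
-- owns the slice of content lines up to the next header; objective: alternative.

-- ===== PORT A =====
-- shared helpers for Python string methods PySem has no primitive for; exact on the ASCII domain
-- (Dom admits only printable ASCII + tab/newline/CR, where Python's "cased" characters are exactly the letters).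

-- line.isupper(): at least one cased character and no lowercase one (exact on ASCII)
def pvIsUpperLine (cs : List Char) : Bool :=
  cs.any PySem.Chars.isupper && !(cs.any PySem.Chars.islower)

-- line.rstrip(':'): drop trailing ':' characters (exact)
def pvRstripColons (cs : List Char) : List Char :=
  (List.dropWhile (· == ':') cs.reverse).reverse

-- s.title(): uppercase a letter following a non-cased character, lowercase other letters (exact on ASCII)
def pvTitleGo : List Char → Bool → List Char
  | [], _ => []
  | c :: rest, prevAlpha =>
    (if PySem.Chars.isalpha c then
       (if prevAlpha then PySem.Chars.lowerChar c else PySem.Chars.upperChar c)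
     else c) :: pvTitleGo rest (PySem.Chars.isalpha c)

def pvTitle (cs : List Char) : List Char := pvTitleGo cs false

-- line.isupper() or line.endswith(':')
def pvIsHeader (cs : List Char) : Bool := pvIsUpperLine cs || PySem.Chars.endswith cs [':']

-- line.rstrip(':').title()
def pvHeaderTitle (cs : List Char) : List Char := pvTitle (pvRstripColons cs)

-- A's loop body after 'line = line.strip()' (state = (sections, current))
def pclhCore (st : PySem.Dict (List Char) (List (List Char)) × List Char) (line : List Char) :
    PySem.Dict (List Char) (List (List Char)) × List Char :=
  if line = [] then st
  else if pvIsHeader line then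
    let current := pvHeaderTitle line
    (st.1.insert current [], current)
  else
    -- sections.setdefault(current, []).append(line)
    (st.1.modify st.2 [] (· ++ [line]), st.2)

def pclhStepA (st : PySem.Dict (List Char) (List (List Char)) × List Char) (raw : List Char) :
    PySem.Dict (List Char) (List (List Char)) × List Char :=
  pclhCore st (PySem.Chars.strip raw)

def parse_clinical_history_text (text : String) : List (String × String) :=
  let r := (PySem.Chars.splitOn text.toList ['\n']).foldl pclhStepA (PySem.Dict.empty, "General".toList)
  r.1.items.map (fun kv => (String.ofList kv.1, String.ofList (PySem.Chars.join ['\n'] kv.2)))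

-- ===== PORT B =====
-- the inner span scan of Source B: each header owns the content slice up to the next header;
-- the while loop advancing j to the next header index is the obvious recursion on the suffix
def pclhBlocks : List (List Char) → List (List Char × List Char)
  | [] => []
  | h :: rest =>
    (pvHeaderTitle h,
     PySem.Chars.join ['\n'] (rest.takeWhile (fun l => !pvIsHeader l)))
      :: pclhBlocks (rest.dropWhile (fun l => !pvIsHeader l))
termination_by ls => ls.length
decreasing_by
  simp only [List.length_cons]
  exact Nat.lt_succ_of_le (List.length_dropWhile_le _ _)

def parse_clinical_history_text_alt (text : String) : List (String × String) :=
  let lines := ((PySem.Chars.splitOn text.toList ['\n']).map PySem.Chars.strip).filter (fun s => s ≠ [])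
  let lead := lines.takeWhile (fun l => !pvIsHeader l)
  let rest := lines.dropWhile (fun l => !pvIsHeader l)
  let base : PySem.Dict (List Char) (List Char) :=
    if lead ≠ [] then PySem.Dict.empty.insert "General".toList (PySem.Chars.join ['\n'] lead)
    else PySem.Dict.empty
  let sections := (pclhBlocks rest).foldl (fun d tb => d.insert tb.1 tb.2) base
  sections.items.map (fun kv => (String.ofList kv.1, String.ofList kv.2))

-- ===== PRECONDITION & SPEC =====
def Spec_parse_clinical_history_text (text : String) (out : List (String × String)) : Prop := out = parse_clinical_history_text_alt text
instance (text : String) (out : List (String × String)) : Decidable (Spec_parse_clinical_history_text text out) := by unfold Spec_parse_clinical_history_text; infer_instance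

-- ===== CLAIM (what is proved, stated in full; the proofs are below) =====
def Claim_equal_parse_clinical_history_text : Prop := ∀ (text : String), Dom_parse_clinical_history_text text → Spec_parse_clinical_history_text text (parse_clinical_history_text text)

-- ===== LEMMAS AND PROOFS =====

lemma pclhCore_nil (st) : pclhCore st [] = st := by simp [pclhCore]

lemma foldl_core_filter : ∀ (ls : List (List Char)) (st),
    (ls.filter (fun x => x ≠ [])).foldl pclhCore st = ls.foldl pclhCore st := by
  intro ls
  induction ls with
  | nil => intro st; rfl
  | cons x xs ih =>
    intro st
    by_cases hx : x = []
    · subst hx; simpa [List.filter_cons, pclhCore_nil] using ih st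
    · have hd : (decide (x ≠ []) : Bool) = true := by simpa using hx
      simp only [List.filter_cons, hd, if_true, List.foldl_cons]
      exact ih _

-- a run of non-blank content lines only appends to the current section
lemma foldl_core_content : ∀ (ls : List (List Char)),
    (∀ x ∈ ls, x ≠ [] ∧ pvIsHeader x = false) →
    ∀ (d : PySem.Dict (List Char) (List (List Char))) (cur : List Char),
    ls.foldl pclhCore (d, cur)
      = ((if ls = [] then d else d.insert cur (d.getD cur [] ++ ls)), cur) := by
  intro ls
  induction ls with
  | nil => intro _ d cur; simp
  | cons x xs ih =>
    intro h d cur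
    obtain ⟨hx, hxh⟩ := h x (by simp)
    have hcore : pclhCore (d, cur) x = (d.insert cur (d.getD cur [] ++ [x]), cur) := by
      simp [pclhCore, hx, hxh, PySem.Dict.modify]
    rw [List.foldl_cons, hcore, ih (fun y hy => h y (by simp [hy]))]
    by_cases hxs : xs = []
    · simp [hxs]
    · rw [if_neg hxs, if_neg (List.cons_ne_nil x xs), PySem.Dict.getD_insert_self,
        PySem.Dict.insert_insert_self]
      simp

lemma foldl_core_after_header (body : List (List Char))
    (hb : ∀ x ∈ body, x ≠ [] ∧ pvIsHeader x = false)
    (d : PySem.Dict (List Char) (List (List Char))) (t : List Char) :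
    body.foldl pclhCore (d.insert t [], t) = (d.insert t body, t) := by
  rw [foldl_core_content body hb]
  by_cases hbody : body = []
  · simp [hbody]
  · simp [hbody, PySem.Dict.getD_insert_self, PySem.Dict.insert_insert_self]

-- joining values commutes with the dict construction
def pclhMapV (d : PySem.Dict (List Char) (List (List Char))) : PySem.Dict (List Char) (List Char) :=
  PySem.Dict.mk (d.items.map (fun kv => (kv.1, PySem.Chars.join ['\n'] kv.2)))

lemma pclhMapV_contains (d : PySem.Dict (List Char) (List (List Char))) (k : List Char) :
    (pclhMapV d).contains k = d.contains k := by
  show (d.items.map _).any _ = _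
  rw [List.any_map]
  rfl

lemma pclhMapV_insert (d : PySem.Dict (List Char) (List (List Char))) (k : List Char)
    (v : List (List Char)) :
    pclhMapV (d.insert k v) = (pclhMapV d).insert k (PySem.Chars.join ['\n'] v) := by
  apply PySem.Dict.ext
  by_cases hc : d.contains k = true
  · rw [show (pclhMapV (d.insert k v)).items
          = (d.insert k v).items.map (fun kv => (kv.1, PySem.Chars.join ['\n'] kv.2)) from rfl,
      PySem.Dict.items_insert_of_contains _ _ hc,
      PySem.Dict.items_insert_of_contains _ _ (by rw [pclhMapV_contains]; exact hc),
      show (pclhMapV d).items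
          = d.items.map (fun kv => (kv.1, PySem.Chars.join ['\n'] kv.2)) from rfl,
      List.map_map, List.map_map]
    apply List.map_congr_left
    intro p _
    by_cases hp : p.1 = k <;> simp [hp]
  · have hcf : d.contains k = false := by simpa using hc
    rw [show (pclhMapV (d.insert k v)).items
          = (d.insert k v).items.map (fun kv => (kv.1, PySem.Chars.join ['\n'] kv.2)) from rfl,
      PySem.Dict.items_insert_of_not_contains _ _ hcf,
      PySem.Dict.items_insert_of_not_contains _ _ (by rw [pclhMapV_contains]; exact hcf),
      List.map_append]
    rfl

-- head of dropWhile fails the predicate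
lemma head_dropWhile_false {α : Type} (p : α → Bool) :
    ∀ (ls : List α) (h : α), (ls.dropWhile p).head? = some h → p h = false := by
  intro ls
  induction ls with
  | nil => intro h hh; simp at hh
  | cons x xs ih =>
    intro h hh
    by_cases hp : p x = true
    · rw [List.dropWhile_cons, if_pos hp] at hh; exact ih h hh
    · rw [List.dropWhile_cons, if_neg hp] at hh
      simp at hh
      subst hh
      simpa using hp

-- main invariant: from any state whose next line is a header (or no lines remain),
-- A's fold builds exactly the dict B assembles from the header spans
lemma pclhMain : ∀ (ls : List (List Char)),
    (∀ x ∈ ls, x ≠ []) →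
    (∀ h, ls.head? = some h → pvIsHeader h = true) →
    ∀ (d : PySem.Dict (List Char) (List (List Char))) (cur : List Char),
    pclhMapV (ls.foldl pclhCore (d, cur)).1
      = (pclhBlocks ls).foldl (fun d tb => d.insert tb.1 tb.2) (pclhMapV d) := by
  intro ls
  induction ls using pclhBlocks.induct with
  | case1 => intro _ _ d cur; simp [pclhBlocks]
  | case2 h rest ih =>
    intro hne hhd d cur
    have hh : pvIsHeader h = true := hhd h rfl
    have hstep : pclhCore (d, cur) h = (d.insert (pvHeaderTitle h) [], pvHeaderTitle h) := by
      simp [pclhCore, hne h (by simp), hh]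
    set body := rest.takeWhile (fun l => !pvIsHeader l) with hbody
    set rest' := rest.dropWhile (fun l => !pvIsHeader l) with hrest'
    have hsplit : body ++ rest' = rest := List.takeWhile_append_dropWhile
    have hbodyP : ∀ x ∈ body, x ≠ [] ∧ pvIsHeader x = false := by
      intro x hx
      have hx1 : x ∈ rest := by rw [← hsplit]; exact List.mem_append_left _ hx
      refine ⟨hne x (by simp [hx1]), ?_⟩
      have := List.mem_takeWhile_imp hx
      simpa using this
    have hrestP : ∀ x ∈ rest', x ≠ [] := by
      intro x hx
      have hx1 : x ∈ rest := by rw [← hsplit]; exact List.mem_append_right _ hx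
      exact hne x (by simp [hx1])
    have hrestH : ∀ h', rest'.head? = some h' → pvIsHeader h' = true := by
      intro h' hh'
      have := head_dropWhile_false (fun l => !pvIsHeader l) rest h' hh'
      simpa using this
    calc pclhMapV (((h :: rest).foldl pclhCore (d, cur)).1)
        = pclhMapV ((rest'.foldl pclhCore
            ((d.insert (pvHeaderTitle h) body), pvHeaderTitle h)).1) := by
          rw [List.foldl_cons, hstep, ← hsplit, List.foldl_append,
            foldl_core_after_header body hbodyP d (pvHeaderTitle h)]
      _ = (pclhBlocks rest').foldl (fun d tb => d.insert tb.1 tb.2)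
            (pclhMapV (d.insert (pvHeaderTitle h) body)) := ih hrestP hrestH _ _
      _ = (pclhBlocks (h :: rest)).foldl (fun d tb => d.insert tb.1 tb.2) (pclhMapV d) := by
          rw [pclhMapV_insert, pclhBlocks, List.foldl_cons]

-- ===== VERDICT (by name: the statement is the Claim_ definition above) =====
theorem parse_clinical_history_text_spec : Claim_equal_parse_clinical_history_text := by
  intro text _
  unfold Spec_parse_clinical_history_text parse_clinical_history_text parse_clinical_history_text_alt
  simp only []
  set raw := PySem.Chars.splitOn text.toList ['\n'] with hraw
  set lines := (raw.map PySem.Chars.strip).filter (fun s => s ≠ []) with hlines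
  have hmem : ∀ x ∈ lines, x ≠ [] := by
    intro x hx
    have := List.of_mem_filter hx
    simpa using this
  have h1 : raw.foldl pclhStepA (PySem.Dict.empty, "General".toList)
      = lines.foldl pclhCore (PySem.Dict.empty, "General".toList) := by
    rw [hlines, foldl_core_filter, List.foldl_map]
    rfl
  set lead := lines.takeWhile (fun l => !pvIsHeader l) with hlead
  set rest := lines.dropWhile (fun l => !pvIsHeader l) with hrest
  have hsplit : lead ++ rest = lines := List.takeWhile_append_dropWhile
  have hleadP : ∀ x ∈ lead, x ≠ [] ∧ pvIsHeader x = false := by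
    intro x hx
    have hx1 : x ∈ lines := by rw [← hsplit]; exact List.mem_append_left _ hx
    refine ⟨hmem x hx1, ?_⟩
    have := List.mem_takeWhile_imp hx
    simpa using this
  have hrestP : ∀ x ∈ rest, x ≠ [] := by
    intro x hx
    have hx1 : x ∈ lines := by rw [← hsplit]; exact List.mem_append_right _ hx
    exact hmem x hx1
  have hrestH : ∀ h', rest.head? = some h' → pvIsHeader h' = true := by
    intro h' hh'
    have := head_dropWhile_false (fun l => !pvIsHeader l) lines h' hh'
    simpa using this
  -- rewrite A's items-map through pclhMapV
  have hitems : ∀ (d : PySem.Dict (List Char) (List (List Char))),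
      d.items.map (fun kv => (String.ofList kv.1, String.ofList (PySem.Chars.join ['\n'] kv.2)))
        = (pclhMapV d).items.map (fun kv => (String.ofList kv.1, String.ofList kv.2)) := by
    intro d; simp [pclhMapV, List.map_map, Function.comp]
  rw [hitems, h1, ← hsplit, List.foldl_append,
    foldl_core_content lead hleadP PySem.Dict.empty "General".toList,
    pclhMain rest hrestP hrestH]
  congr 2
  by_cases hL : lead = []
  · simp [hL, pclhMapV, PySem.Dict.empty]
  · simp [hL, pclhMapV, PySem.Dict.empty, PySem.Dict.insert, PySem.Dict.contains,
      PySem.Dict.getD, PySem.Dict.get?]
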